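-- pv_equiv track=rewrite | github.com/MuhammadMaazAhmed/Projects | Cits1401 project2.py | conjunctions
-- ===== SOURCE A (Python) =====
-- def conjunctions(w):
--     conjunction = {'also': 0, 'although': 0, 'and': 0, 'as': 0, 'because': 0, 'before': 0, 'but': 0, 'for': 0,
--                    'if': 0, 'nor': 0, 'of': 0, 'or': 0, 'since': 0, 'that': 0, 'though': 0, 'until': 0, 'when': 0,
--                    'whenever': 0, 'whereas': 0, 'which': 0, 'while': 0, 'yet': 0}
--     for line in w:
--         for word in line:
--             if word in conjunction:
--                 conjunction[word] += 1
--     return (conjunction)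
-- ===== SOURCE B (Python) =====
-- def conjunctions(w):
--     conjunction_words = ('also', 'although', 'and', 'as', 'because', 'before', 'but', 'for',
--                          'if', 'nor', 'of', 'or', 'since', 'that', 'though', 'until', 'when',
--                          'whenever', 'whereas', 'which', 'while', 'yet')
--     result = dict.fromkeys(conjunction_words, 0)
--     # sort-then-scan: sort the matching words, then one run-length pass writes each
--     # run's length; no per-word increments, each key is written at most once.
--     hits = sorted(word for line in w for word in line if word in result)
--     prev = None
--     run = 0
--     for word in hits:
--         if word == prev:
--             run += 1
--         else:
--             if prev is not None:
--                 result[prev] = run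
--             prev = word
--             run = 1
--     if prev is not None:
--         result[prev] = run
--     return result
-- ===== Notes on version B (the rewrite author's own statement) =====
-- stated objective: alternative
-- what changed: B sorts the matching words and computes each key's value in one run-length pass over the sorted list (each key written at most once with its run length), instead of A's membership-guarded per-word increment into a zero dict.
import Mathlib
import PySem

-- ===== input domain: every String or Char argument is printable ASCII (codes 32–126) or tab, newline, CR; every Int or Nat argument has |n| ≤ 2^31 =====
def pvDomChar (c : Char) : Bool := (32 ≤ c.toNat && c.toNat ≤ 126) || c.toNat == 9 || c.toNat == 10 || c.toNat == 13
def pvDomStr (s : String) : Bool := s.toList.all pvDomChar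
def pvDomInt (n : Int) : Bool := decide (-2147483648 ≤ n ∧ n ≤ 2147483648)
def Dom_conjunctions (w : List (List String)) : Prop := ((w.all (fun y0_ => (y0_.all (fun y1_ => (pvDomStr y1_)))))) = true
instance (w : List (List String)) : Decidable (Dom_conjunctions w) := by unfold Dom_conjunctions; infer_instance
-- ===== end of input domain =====

-- B sorts the matching words and fills the table in one run-length pass over the sorted
-- list, instead of A's membership-guarded per-word increments (objective: alternative).

-- ===== PORT A =====
def conjunctions (w : List (List String)) : List (String × Int) :=
  let conjunction : PySem.Dict String Int := PySem.Dict.ofList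
    [("also", 0), ("although", 0), ("and", 0), ("as", 0), ("because", 0), ("before", 0),
     ("but", 0), ("for", 0), ("if", 0), ("nor", 0), ("of", 0), ("or", 0), ("since", 0),
     ("that", 0), ("though", 0), ("until", 0), ("when", 0), ("whenever", 0), ("whereas", 0),
     ("which", 0), ("while", 0), ("yet", 0)]
  (w.foldl (fun d line =>
    line.foldl (fun d word =>
      if d.contains word then d.modify word 0 (· + 1) else d) d) conjunction).items

-- ===== PORT B =====
-- dict.fromkeys(conjunction_words, 0)
def conjDict0 : PySem.Dict String Int := PySem.Dict.ofList
  [("also", 0), ("although", 0), ("and", 0), ("as", 0), ("because", 0), ("before", 0),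
   ("but", 0), ("for", 0), ("if", 0), ("nor", 0), ("of", 0), ("or", 0), ("since", 0),
   ("that", 0), ("though", 0), ("until", 0), ("when", 0), ("whenever", 0), ("whereas", 0),
   ("which", 0), ("while", 0), ("yet", 0)]

-- one step of the run-length loop; state = (result, prev, run)
def rlStep (st : PySem.Dict String Int × Option String × Int) (word : String) :
    PySem.Dict String Int × Option String × Int :=
  match st with
  | (d, prev, run) =>
    if prev = some word then (d, prev, run + 1)
    else
      match prev with
      | some p => (d.insert p run, some word, 1)
      | none => (d, some word, 1)

-- the final 'if prev is not None: result[prev] = run'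
def rlFinish (st : PySem.Dict String Int × Option String × Int) : PySem.Dict String Int :=
  match st with
  | (d, some p, run) => d.insert p run
  | (d, none, _) => d

def conjunctions_alt (w : List (List String)) : List (String × Int) :=
  let hits := PySem.List.sorted
    ((w.flatMap (fun line => line)).filter (fun word => conjDict0.contains word))
    (fun x => x) false
  (rlFinish (hits.foldl rlStep (conjDict0, none, 0))).items

-- ===== PRECONDITION & SPEC =====
def Spec_conjunctions (w : List (List String)) (out : List (String × Int)) : Prop := out = conjunctions_alt w
instance (w : List (List String)) (out : List (String × Int)) : Decidable (Spec_conjunctions w out) := by unfold Spec_conjunctions; infer_instance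

-- ===== CLAIM (what is proved, stated in full; the proofs are below) =====
def Claim_equal_conjunctions : Prop := ∀ (w : List (List String)), Dom_conjunctions w → Spec_conjunctions w (conjunctions w)

-- ===== LEMMAS AND PROOFS =====

def conjWordsB : List String :=
  ["also", "although", "and", "as", "because", "before", "but", "for", "if", "nor", "of",
   "or", "since", "that", "though", "until", "when", "whenever", "whereas", "which",
   "while", "yet"]

-- ---------- A side ----------

def conjStep (d : PySem.Dict String Int) (word : String) : PySem.Dict String Int :=
  if d.contains word then d.modify word 0 (· + 1) else d

lemma keys_conjStep (d : PySem.Dict String Int) (x : String) :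
    (conjStep d x).keys = d.keys := by
  unfold conjStep
  split_ifs with h
  · rw [PySem.Dict.keys_modify]
    simp [PySem.Dict.keys_insert_of_contains, h]
  · rfl

lemma keys_foldl_conjStep (l : List String) (d : PySem.Dict String Int) :
    (l.foldl conjStep d).keys = d.keys := by
  induction l generalizing d with
  | nil => rfl
  | cons x l ih => simp [List.foldl_cons, ih, keys_conjStep]

lemma getD_foldl_conjStep (l : List String) (d : PySem.Dict String Int) (k : String) :
    (l.foldl conjStep d).getD k 0 =
      d.getD k 0 + (if d.contains k then (l.count k : Int) else 0) := by
  induction l generalizing d with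
  | nil => split_ifs <;> simp
  | cons x l ih =>
    rw [List.foldl_cons, ih]
    have hc : (conjStep d x).contains k = d.contains k := by
      unfold conjStep
      split_ifs with h
      · rw [PySem.Dict.contains_modify]
        by_cases hkx : k = x <;> simp [hkx, h]
      · rfl
    rw [hc]
    unfold conjStep
    by_cases h : d.contains x = true
    · rw [if_pos h, PySem.Dict.getD_modify]
      by_cases hkx : k = x
      · subst hkx
        rw [if_pos rfl, if_pos h, if_pos h]
        simp only [List.count_cons_self]
        push_cast
        ring
      · rw [if_neg hkx]
        have : (x :: l).count k = l.count k := by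
          simp [List.count_cons]
          intro h'; exact absurd h'.symm hkx
        rw [this]
    · rw [if_neg (by simp [h])]
      by_cases hck : d.contains k = true
      · rw [if_pos hck, if_pos hck]
        have hkx : k ≠ x := by rintro rfl; exact h hck
        have : (x :: l).count k = l.count k := by
          simp [List.count_cons]
          intro h'; exact absurd h'.symm hkx
        rw [this]
      · simp at hck
        rw [if_neg (by simp [hck]), if_neg (by simp [hck])]

lemma foldl_conjStep_flatMap (w : List (List String)) (d : PySem.Dict String Int) :
    w.foldl (fun d line => line.foldl conjStep d) d =
      (w.flatMap (fun line => line)).foldl conjStep d := by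
  induction w generalizing d with
  | nil => rfl
  | cons line w ih =>
    rw [List.foldl_cons, List.flatMap_cons, List.foldl_append, ih]

-- ---------- B side ----------

lemma rlStep_some (d : PySem.Dict String Int) (p : String) (r : Int) (a : String) :
    rlStep (d, some p, r) a =
      if p = a then (d, some p, r + 1) else (d.insert p r, some a, 1) := by
  unfold rlStep
  by_cases h : p = a <;> simp [h]

lemma keys_rlFinish_foldl (s : List String) (d : PySem.Dict String Int) (p : String) (r : Int)
    (hs : ∀ y ∈ s, d.contains y = true) (hp : d.contains p = true) :
    (rlFinish (s.foldl rlStep (d, some p, r))).keys = d.keys := by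
  induction s generalizing d p r with
  | nil => simp [rlFinish, PySem.Dict.keys_insert_of_contains, hp]
  | cons a s ih =>
    rw [List.foldl_cons, rlStep_some]
    by_cases h : p = a
    · rw [if_pos h]
      exact ih d p (r + 1) (fun y hy => hs y (List.mem_cons_of_mem _ hy)) hp
    · rw [if_neg h]
      have hkeys : (d.insert p r).keys = d.keys := PySem.Dict.keys_insert_of_contains d r hp
      have hcont : ∀ y, (d.insert p r).contains y = true ↔ d.contains y = true := by
        intro y
        rw [PySem.Dict.contains_iff_mem_keys, PySem.Dict.contains_iff_mem_keys, hkeys]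
      rw [ih (d.insert p r) a 1
        (fun y hy => (hcont y).mpr (hs y (List.mem_cons_of_mem _ hy)))
        ((hcont a).mpr (hs a List.mem_cons_self)), hkeys]

-- the run-length invariant over a sorted suffix
lemma getD_rlFinish_foldl (s : List String) (d : PySem.Dict String Int) (p : String) (r : Int)
    (k : String) (hsort : s.Pairwise (· ≤ ·)) (hge : ∀ y ∈ s, p ≤ y) :
    (rlFinish (s.foldl rlStep (d, some p, r))).getD k 0 =
      if k = p then r + (s.count p : Int)
      else if k ∈ s then (s.count k : Int) else d.getD k 0 := by
  induction s generalizing d p r with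
  | nil =>
    simp only [List.foldl_nil, rlFinish, List.count_nil, List.not_mem_nil]
    rw [PySem.Dict.getD_insert]
    split_ifs <;> simp_all
  | cons a s ih =>
    rw [List.foldl_cons, rlStep_some]
    have hpairs := (List.pairwise_cons.mp hsort)
    by_cases h : p = a
    · -- a = p : continue the run
      subst h
      rw [if_pos rfl, ih d p (r + 1) hpairs.2 hpairs.1]
      by_cases hk : k = p
      · subst hk
        rw [if_pos rfl, if_pos rfl, List.count_cons_self]
        push_cast; ring
      · rw [if_neg hk, if_neg hk]
        have hcnt : (p :: s).count k = s.count k := by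
          simp [List.count_cons]; intro h'; exact absurd h'.symm hk
        simp [hcnt, hk]
    · -- a ≠ p : flush p with r, start run for a
      rw [if_neg h]
      have hap : p ≠ a := h
      have hplt : p ∉ a :: s := by
        intro hmem
        rcases List.mem_cons.mp hmem with he | hmem'
        · exact hap he
        · -- p ∈ s, but p ≤ a ≤ p forces p = a
          have h1 : a ≤ p := hpairs.1 p hmem'
          have h2 : p ≤ a := hge a List.mem_cons_self
          exact hap (le_antisymm h2 h1)
      rw [ih (d.insert p r) a 1 hpairs.2 hpairs.1]
      by_cases hk : k = p
      · subst hk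
        rw [if_pos rfl, if_neg hap]
        have hkns : k ∉ s := fun hm => hplt (List.mem_cons_of_mem _ hm)
        rw [if_neg hkns, PySem.Dict.getD_insert, if_pos rfl]
        have : (a :: s).count k = 0 := List.count_eq_zero.mpr hplt
        simp [this]
      · rw [if_neg hk]
        by_cases hka : k = a
        · subst hka
          rw [if_pos rfl, if_pos List.mem_cons_self, List.count_cons_self]
          push_cast; ring
        · rw [if_neg hka]
          have hcnt : (a :: s).count k = s.count k := by
            simp [List.count_cons]; intro h'; exact absurd h'.symm hka
          have hmem : k ∈ a :: s ↔ k ∈ s := by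
            simp [List.mem_cons, hka]
          simp only [hcnt, hmem]
          rw [PySem.Dict.getD_insert, if_neg hk]

lemma getD_rl_sorted (s : List String) (k : String) (hsort : s.Pairwise (· ≤ ·)) :
    (rlFinish (s.foldl rlStep (conjDict0, none, 0))).getD k 0 =
      if k ∈ s then (s.count k : Int) else conjDict0.getD k 0 := by
  cases s with
  | nil => simp [rlFinish]
  | cons a s =>
    rw [List.foldl_cons]
    have hstep : rlStep (conjDict0, none, 0) a = (conjDict0, some a, 1) := by
      unfold rlStep; simp
    rw [hstep]
    have hpairs := (List.pairwise_cons.mp hsort)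
    rw [getD_rlFinish_foldl s conjDict0 a 1 k hpairs.2 hpairs.1]
    by_cases hk : k = a
    · subst hk
      rw [if_pos rfl, if_pos List.mem_cons_self, List.count_cons_self]
      push_cast; ring
    · rw [if_neg hk]
      have hcnt : (a :: s).count k = s.count k := by
        simp [List.count_cons]; intro h'; exact absurd h'.symm hk
      have hmem : k ∈ a :: s ↔ k ∈ s := by simp [List.mem_cons, hk]
      simp only [hcnt, hmem]

lemma keys_rl_sorted (s : List String) (hs : ∀ y ∈ s, conjDict0.contains y = true) :
    (rlFinish (s.foldl rlStep (conjDict0, none, 0))).keys = conjDict0.keys := by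
  cases s with
  | nil => rfl
  | cons a s =>
    rw [List.foldl_cons]
    have hstep : rlStep (conjDict0, none, 0) a = (conjDict0, some a, 1) := by
      unfold rlStep; simp
    rw [hstep]
    exact keys_rlFinish_foldl s conjDict0 a 1
      (fun y hy => hs y (List.mem_cons_of_mem _ hy)) (hs a List.mem_cons_self)

-- ===== VERDICT (by name: the statement is the Claim_ definition above) =====
theorem conjunctions_spec : Claim_equal_conjunctions := by
  intro w _
  unfold Spec_conjunctions conjunctions conjunctions_alt
  show (w.foldl (fun d line => line.foldl conjStep d) conjDict0).items = _
  rw [foldl_conjStep_flatMap w conjDict0]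
  set flat := w.flatMap (fun line => line) with hflatdef
  set hits := PySem.List.sorted (flat.filter (fun word => conjDict0.contains word))
    (fun x => x) false with hhits
  -- keys of both result dicts are the 22 conjunction words
  have hkeysA : (flat.foldl conjStep conjDict0).keys = conjWordsB := by
    rw [keys_foldl_conjStep]; decide
  have hndA : (flat.foldl conjStep conjDict0).keys.Nodup := by rw [hkeysA]; decide
  have hhitsmem : ∀ y ∈ hits, conjDict0.contains y = true := by
    intro y hy
    have : y ∈ flat.filter (fun word => conjDict0.contains word) :=
      (PySem.List.mem_sorted _ _ _ _).mp hy
    exact (List.mem_filter.mp this).2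
  have hkeysB : (rlFinish (hits.foldl rlStep (conjDict0, none, 0))).keys = conjWordsB := by
    rw [keys_rl_sorted hits hhitsmem]; decide
  have hndB : (rlFinish (hits.foldl rlStep (conjDict0, none, 0))).keys.Nodup := by
    rw [hkeysB]; decide
  rw [PySem.Dict.items_eq_map_keys _ hndA 0, PySem.Dict.items_eq_map_keys _ hndB 0,
    hkeysA, hkeysB]
  apply List.map_congr_left
  intro k hk
  have hkk : k ∈ conjDict0.keys := by
    have : conjDict0.keys = conjWordsB := by decide
    rw [this]; exact hk
  have hc : conjDict0.contains k = true := (PySem.Dict.contains_iff_mem_keys _ _).mpr hkk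
  have h0 : conjDict0.getD k 0 = 0 := by fin_cases hk <;> decide
  -- A's entry is the count of k in flat
  rw [getD_foldl_conjStep, h0, if_pos hc]
  -- B's entry likewise
  have hsorted : hits.Pairwise (· ≤ ·) := by
    have := PySem.List.sorted_pairwise (flat.filter (fun word => conjDict0.contains word))
      (fun x => x)
    simpa [hhits] using this
  rw [getD_rl_sorted hits k hsorted]
  have hcnt_sorted : hits.count k = (flat.filter (fun word => conjDict0.contains word)).count k :=
    (PySem.List.sorted_perm _ _ _).count_eq k
  have hcnt_filter : (flat.filter (fun word => conjDict0.contains word)).count k = flat.count k := by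
    rw [List.count_filter]
    simp [hc]
  by_cases hmem : k ∈ hits
  · rw [if_pos hmem, hcnt_sorted, hcnt_filter]
    simp
  · rw [if_neg hmem, h0]
    have : flat.count k = 0 := by
      have h1 : (flat.filter (fun word => conjDict0.contains word)).count k = 0 := by
        rw [← hcnt_sorted]
        exact List.count_eq_zero.mpr hmem
      rw [← hcnt_filter, h1]
    simp [this]
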